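-- pv_equiv track=rewrite | github.com/NullZeroOne/Toys | backwards_life_torus_growing.py | resize_target_torus_sum
-- ===== SOURCE A (Python) =====
-- from typing import List, Tuple, Set, Optional
--
-- def resize_target_torus_sum(target: List[List[int]], R: int, C: int) -> List[List[int]]:
--     """Project target onto an R x C torus by modulo-indexing and OR-summing overlapping cells."""
--     r0, c0 = len(target), len(target[0])
--     out = [[0]*C for _ in range(R)]
--     for i in range(r0):
--         for j in range(c0):
--             if target[i][j]:
--                 out[i % R][j % C] = 1
--     return out
-- ===== SOURCE B (Python) =====
-- def resize_target_torus_sum(target, R, C):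
--     """Project target onto an R x C torus: fold rows mod R into a buffer, then columns mod C."""
--     r0, c0 = len(target), len(target[0])
--     inter = [[0] * c0 for _ in range(R)]
--     for i in range(r0):
--         for j in range(c0):
--             if target[i][j]:
--                 inter[i % R][j] = 1
--     out = [[0] * C for _ in range(R)]
--     for i in range(R):
--         for j in range(c0):
--             if inter[i][j]:
--                 out[i][j % C] = 1
--     return out
-- ===== Notes on version B (the rewrite author's own statement) =====
-- stated objective: alternative
-- what changed: the single nested modulo-scatter out[i%R][j%C]=1 is replaced by two separable passes: rows are first folded modulo R into an intermediate R x c0 buffer, then its columns are folded modulo C into the output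
import Mathlib
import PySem

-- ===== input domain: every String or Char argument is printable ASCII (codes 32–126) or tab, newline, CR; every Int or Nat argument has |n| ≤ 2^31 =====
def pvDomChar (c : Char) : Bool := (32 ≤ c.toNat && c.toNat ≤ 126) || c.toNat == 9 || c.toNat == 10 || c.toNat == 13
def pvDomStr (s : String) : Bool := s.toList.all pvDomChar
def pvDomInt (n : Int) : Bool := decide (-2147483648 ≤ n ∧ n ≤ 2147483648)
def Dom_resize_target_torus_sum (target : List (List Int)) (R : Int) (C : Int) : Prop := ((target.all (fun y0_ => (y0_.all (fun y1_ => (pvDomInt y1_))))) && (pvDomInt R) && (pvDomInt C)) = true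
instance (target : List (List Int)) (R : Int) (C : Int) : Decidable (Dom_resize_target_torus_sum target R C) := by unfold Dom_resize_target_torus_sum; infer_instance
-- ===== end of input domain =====

-- B replaces A's single nested modulo-scatter by two separable passes through an
-- intermediate R × c0 buffer (rows folded mod R first, then columns mod C); alternative
-- decomposition, same asymptotic cost.

-- out[r][c] = 1  (grid cell assignment; r, c already reduced to in-range Nat indices)
def pvSetCell (g : List (List Int)) (r c : Nat) : List (List Int) :=
  g.set r ((g.getD r []).set c 1)

-- g[r][c] read (0 default out of range; in-range under Pre_)
def pvCell (g : List (List Int)) (r c : Nat) : Int :=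
  (g.getD r []).getD c 0

-- ===== PORT A =====
def resize_target_torus_sum (target : List (List Int)) (R : Int) (C : Int) : List (List Int) :=
  (List.range target.length).foldl (fun out i =>
    (List.range target.headI.length).foldl (fun out j =>
      if pvCell target i j ≠ 0 then
        pvSetCell out (PySem.Int.mod (i : Int) R).toNat (PySem.Int.mod (j : Int) C).toNat
      else out) out)
    ((List.range R.toNat).map (fun _ => List.replicate C.toNat (0 : Int)))

-- ===== PORT B =====
def resize_target_torus_sum_alt (target : List (List Int)) (R : Int) (C : Int) : List (List Int) :=
  let inter := (List.range target.length).foldl (fun acc i =>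
    (List.range target.headI.length).foldl (fun acc j =>
      if pvCell target i j ≠ 0 then
        pvSetCell acc (PySem.Int.mod (i : Int) R).toNat j
      else acc) acc)
    ((List.range R.toNat).map (fun _ => List.replicate target.headI.length (0 : Int)))
  (List.range R.toNat).foldl (fun out i =>
    (List.range target.headI.length).foldl (fun out j =>
      if pvCell inter i j ≠ 0 then
        pvSetCell out i (PySem.Int.mod (j : Int) C).toNat
      else out) out)
    ((List.range R.toNat).map (fun _ => List.replicate C.toNat (0 : Int)))

-- ===== PRECONDITION & SPEC =====
-- Pre_ excludes exactly the inputs where A raises: an empty grid (IndexError at target[0]),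
-- a row shorter than the first row (IndexError), and R ≤ 0 or C ≤ 0 when some scanned cell
-- is nonzero (ZeroDivisionError/IndexError at the scatter).
def Pre_resize_target_torus_sum (target : List (List Int)) (R : Int) (C : Int) : Prop :=
  target ≠ [] ∧ (∀ row ∈ target, target.headI.length ≤ row.length) ∧
  ((1 ≤ R ∧ 1 ≤ C) ∨ ∀ row ∈ target, ∀ x ∈ row.take target.headI.length, x = 0)
instance (target : List (List Int)) (R : Int) (C : Int) : Decidable (Pre_resize_target_torus_sum target R C) := by unfold Pre_resize_target_torus_sum; infer_instance

def pvWitness_resize_target_torus_sum : List (List Int) × Int × Int := ([[1, 0], [0, 1]], 2, 3)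

def Spec_resize_target_torus_sum (target : List (List Int)) (R : Int) (C : Int) (out : List (List Int)) : Prop := out = resize_target_torus_sum_alt target R C
instance (target : List (List Int)) (R : Int) (C : Int) (out : List (List Int)) : Decidable (Spec_resize_target_torus_sum target R C out) := by unfold Spec_resize_target_torus_sum; infer_instance

-- ===== CLAIM (what is proved, stated in full; the proofs are below) =====
def Claim_equal_resize_target_torus_sum : Prop := ∀ (target : List (List Int)) (R : Int) (C : Int), Dom_resize_target_torus_sum target R C → Pre_resize_target_torus_sum target R C → Spec_resize_target_torus_sum target R C (resize_target_torus_sum target R C)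


-- ===== LEMMAS AND PROOFS =====

-- apply a list of cell updates in order
def applyUpds (g : List (List Int)) (L : List (Nat × Nat)) : List (List Int) :=
  L.foldl (fun g p => pvSetCell g p.1 p.2) g

theorem applyUpds_append (g : List (List Int)) (L1 L2 : List (Nat × Nat)) :
    applyUpds g (L1 ++ L2) = applyUpds (applyUpds g L1) L2 :=
  List.foldl_append

theorem length_pvSetCell (g : List (List Int)) (r c : Nat) :
    (pvSetCell g r c).length = g.length := by
  simp [pvSetCell]

theorem rowlen_pvSetCell (g : List (List Int)) (r c : Nat) (Cn : Nat)
    (hg : ∀ row ∈ g, row.length = Cn) (hr : r < g.length) :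
    ∀ row ∈ pvSetCell g r c, row.length = Cn := by
  intro row hrow
  rcases List.mem_or_eq_of_mem_set hrow with h | h
  · exact hg row h
  · subst h
    have hmem : g.getD r [] ∈ g := by
      rw [List.getD_eq_getElem g [] hr]; exact List.getElem_mem hr
    rw [List.length_set]
    exact hg _ hmem

theorem cell_pvSetCell (g : List (List Int)) (r' c' r c : Nat)
    (hr : r' < g.length) (hc : c' < (g.getD r' []).length) :
    pvCell (pvSetCell g r' c') r c = if r = r' ∧ c = c' then 1 else pvCell g r c := by
  have hc2 : c' < (g[r']?.getD []).length := by simpa [List.getD] using hc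
  unfold pvCell pvSetCell
  by_cases hrr : r' = r
  · subst hrr
    simp only [List.getD, List.getElem?_set, if_pos hr]
    by_cases hcc : c' = c
    · subst hcc
      simp [hc2]
    · simp [hcc]
      exact fun h => absurd h.symm hcc
  · simp [List.getD, hrr]
    exact fun h _ => absurd h.symm hrr

theorem applyUpds_length (g : List (List Int)) (L : List (Nat × Nat)) :
    (applyUpds g L).length = g.length := by
  induction L generalizing g with
  | nil => rfl
  | cons p L ih =>
    have hstep : applyUpds g (p :: L) = applyUpds (pvSetCell g p.1 p.2) L := rfl
    rw [hstep, ih, length_pvSetCell]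

theorem applyUpds_rowlen (g : List (List Int)) (L : List (Nat × Nat)) (Rn Cn : Nat)
    (hlen : g.length = Rn) (hg : ∀ row ∈ g, row.length = Cn)
    (hL : ∀ p ∈ L, p.1 < Rn ∧ p.2 < Cn) :
    ∀ row ∈ applyUpds g L, row.length = Cn := by
  induction L generalizing g with
  | nil => exact hg
  | cons p L ih =>
    have hp := hL p List.mem_cons_self
    refine ih (pvSetCell g p.1 p.2) ?_ ?_ (fun q hq => hL q (List.mem_cons_of_mem _ hq))
    · rw [length_pvSetCell, hlen]
    · exact rowlen_pvSetCell g p.1 p.2 Cn hg (by omega)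

theorem applyUpds_cell (g : List (List Int)) (L : List (Nat × Nat)) (Rn Cn : Nat)
    (hlen : g.length = Rn) (hg : ∀ row ∈ g, row.length = Cn)
    (hL : ∀ p ∈ L, p.1 < Rn ∧ p.2 < Cn) (r c : Nat) :
    pvCell (applyUpds g L) r c = if (r, c) ∈ L then 1 else pvCell g r c := by
  induction L generalizing g with
  | nil => simp [applyUpds]
  | cons p L ih =>
    have hp := hL p List.mem_cons_self
    have hr : p.1 < g.length := by omega
    have hc : p.2 < (g.getD p.1 []).length := by
      have hmem : g.getD p.1 [] ∈ g := by
        rw [List.getD_eq_getElem g [] hr]; exact List.getElem_mem hr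
      rw [hg _ hmem]; exact hp.2
    have hstep : applyUpds g (p :: L) = applyUpds (pvSetCell g p.1 p.2) L := rfl
    rw [hstep, ih (pvSetCell g p.1 p.2) (by rw [length_pvSetCell, hlen])
        (rowlen_pvSetCell g p.1 p.2 Cn hg hr)
        (fun q hq => hL q (List.mem_cons_of_mem _ hq)),
      cell_pvSetCell g p.1 p.2 r c hr hc]
    by_cases h1 : (r, c) ∈ L
    · simp [h1]
    · by_cases h2 : r = p.1 ∧ c = p.2
      · simp [h2]
      · have : ¬ (r, c) ∈ p :: L := by
          intro hmem
          rcases List.mem_cons.mp hmem with h | h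
          · exact h2 (by cases p; cases h; exact ⟨rfl, rfl⟩)
          · exact h1 h
        simp [h1, h2, this]

theorem cell_zeros (Rn Cn : Nat) (r c : Nat) :
    pvCell (List.replicate Rn (List.replicate Cn (0 : Int))) r c = 0 := by
  unfold pvCell
  by_cases hr : r < Rn
  · rw [List.getD_eq_getElem _ [] (by simpa using hr)]
    simp
  · rw [List.getD_eq_default _ [] (by simpa using hr)]
    simp

theorem foldl_if_filterMap {a : Type} (l : List a) (P : a → Prop) [DecidablePred P]
    (u1 u2 : a → Nat) (g : List (List Int)) :
    l.foldl (fun g x => if P x then pvSetCell g (u1 x) (u2 x) else g) g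
      = applyUpds g (l.filterMap fun x => if P x then some (u1 x, u2 x) else none) := by
  induction l generalizing g with
  | nil => rfl
  | cons x l ih =>
    by_cases hx : P x
    · simp only [List.foldl_cons, List.filterMap_cons, if_pos hx]
      rw [ih]; rfl
    · simp only [List.foldl_cons, List.filterMap_cons, if_neg hx]
      exact ih g

theorem foldl_apply_flatMap {a : Type} (l : List a) (F : a → List (Nat × Nat))
    (g : List (List Int)) :
    l.foldl (fun g x => applyUpds g (F x)) g = applyUpds g (l.flatMap F) := by
  induction l generalizing g with
  | nil => rfl
  | cons x l ih => simp only [List.foldl_cons, List.flatMap_cons, applyUpds_append, ih]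

theorem foldl_id {a b : Type} (l : List a) (f : b → a → b) (init : b)
    (h : ∀ x ∈ l, ∀ acc, f acc x = acc) : l.foldl f init = init := by
  induction l generalizing init with
  | nil => rfl
  | cons x l ih =>
    rw [List.foldl_cons, h x List.mem_cons_self]
    exact ih init (fun y hy acc => h y (List.mem_cons_of_mem _ hy) acc)

theorem grid_ext (g1 g2 : List (List Int)) (Rn Cn : Nat)
    (h1 : g1.length = Rn) (h2 : g2.length = Rn)
    (hr1 : ∀ row ∈ g1, row.length = Cn) (hr2 : ∀ row ∈ g2, row.length = Cn)
    (hcell : ∀ r c : Nat, pvCell g1 r c = pvCell g2 r c) : g1 = g2 := by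
  apply List.ext_getElem (by omega)
  intro r hra hrb
  have e1 : g1[r].length = Cn := hr1 _ (List.getElem_mem hra)
  have e2 : g2[r].length = Cn := hr2 _ (List.getElem_mem hrb)
  apply List.ext_getElem (by omega)
  intro c hca hcb
  have := hcell r c
  unfold pvCell at this
  rwa [List.getD_eq_getElem g1 [] hra, List.getD_eq_getElem g2 [] hrb,
    List.getD_eq_getElem _ 0 hca, List.getD_eq_getElem _ 0 hcb] at this

theorem mod_toNat_lt (i : Nat) (R : Int) (hR : 1 ≤ R) :
    (PySem.Int.mod (i : Int) R).toNat < R.toNat := by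
  have h1 := PySem.Int.mod_nonneg (i : Int) (by omega : (0:Int) < R)
  have h2 := PySem.Int.mod_lt (i : Int) (by omega : (0:Int) < R)
  omega


theorem range_map_const {a : Type} (n : Nat) (x : a) :
    (List.range n).map (fun _ => x) = List.replicate n x := by
  simp [List.map_const']

theorem zeros_rowlen (Rn Cn : Nat) :
    ∀ row ∈ List.replicate Rn (List.replicate Cn (0 : Int)), row.length = Cn := by
  intro row h; rw [List.eq_of_mem_replicate h, List.length_replicate]

-- two in-range scatters over the zero grid agree iff they hit the same set of cells
theorem scatter_eq (Rn Cn : Nat) (L L' : List (Nat × Nat))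
    (hL : ∀ p ∈ L, p.1 < Rn ∧ p.2 < Cn) (hL' : ∀ p ∈ L', p.1 < Rn ∧ p.2 < Cn)
    (hmem : ∀ r c : Nat, (r, c) ∈ L ↔ (r, c) ∈ L') :
    applyUpds (List.replicate Rn (List.replicate Cn (0 : Int))) L
      = applyUpds (List.replicate Rn (List.replicate Cn (0 : Int))) L' := by
  apply grid_ext _ _ Rn Cn
  · rw [applyUpds_length, List.length_replicate]
  · rw [applyUpds_length, List.length_replicate]
  · exact applyUpds_rowlen _ _ _ _ List.length_replicate (zeros_rowlen Rn Cn) hL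
  · exact applyUpds_rowlen _ _ _ _ List.length_replicate (zeros_rowlen Rn Cn) hL'
  · intro r c
    rw [applyUpds_cell _ _ Rn Cn List.length_replicate (zeros_rowlen Rn Cn) hL r c,
        applyUpds_cell _ _ Rn Cn List.length_replicate (zeros_rowlen Rn Cn) hL' r c]
    exact if_congr (hmem r c) rfl rfl

theorem L1_bounds (f : Nat → Nat → Int) (r0 c0 : Nat) (R : Int) (hR : 1 ≤ R) :
    ∀ p ∈ (List.range r0).flatMap (fun i => (List.range c0).filterMap (fun j =>
        if f i j ≠ 0 then some ((PySem.Int.mod (i : Int) R).toNat, j) else none)),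
      p.1 < R.toNat ∧ p.2 < c0 := by
  intro p hp
  simp only [List.mem_flatMap, List.mem_filterMap, List.mem_range,
    Option.ite_none_right_eq_some, Option.some.injEq] at hp
  obtain ⟨i, hi, j, hj, _, hp⟩ := hp
  subst hp
  exact ⟨mod_toNat_lt i R hR, hj⟩

-- entry characterisation of B's intermediate buffer
theorem inter_cell (f : Nat → Nat → Int) (r0 c0 : Nat) (R : Int) (hR : 1 ≤ R) (i j : Nat) :
    pvCell (applyUpds (List.replicate R.toNat (List.replicate c0 (0 : Int)))
      ((List.range r0).flatMap (fun i => (List.range c0).filterMap (fun j =>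
        if f i j ≠ 0 then some ((PySem.Int.mod (i : Int) R).toNat, j) else none)))) i j
    = if ∃ i' < r0, j < c0 ∧ f i' j ≠ 0 ∧ (PySem.Int.mod (i' : Int) R).toNat = i then 1 else 0 := by
  rw [applyUpds_cell _ _ R.toNat c0 List.length_replicate (zeros_rowlen R.toNat c0)
      (L1_bounds f r0 c0 R hR) i j, cell_zeros]
  refine if_congr ?_ rfl rfl
  simp only [List.mem_flatMap, List.mem_filterMap, List.mem_range,
    Option.ite_none_right_eq_some, Option.some.injEq, Prod.mk.injEq]
  constructor
  · rintro ⟨i', hi', j', hj', hf, h1, h2⟩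
    exact ⟨i', hi', h2 ▸ hj', h2 ▸ hf, h1⟩
  · rintro ⟨i', hi', hj, hf, h1⟩
    exact ⟨i', hi', j, hj, hf, h1, rfl⟩

-- the whole main case: A's one-pass scatter equals B's two separable passes
theorem torus_two_pass (f : Nat → Nat → Int) (r0 c0 : Nat) (R C : Int)
    (hR : 1 ≤ R) (hC : 1 ≤ C) :
    applyUpds (List.replicate R.toNat (List.replicate C.toNat (0 : Int)))
      ((List.range r0).flatMap (fun i => (List.range c0).filterMap (fun j =>
        if f i j ≠ 0 then
          some ((PySem.Int.mod (i : Int) R).toNat, (PySem.Int.mod (j : Int) C).toNat)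
        else none)))
    = applyUpds (List.replicate R.toNat (List.replicate C.toNat (0 : Int)))
      ((List.range R.toNat).flatMap (fun i => (List.range c0).filterMap (fun j =>
        if pvCell (applyUpds (List.replicate R.toNat (List.replicate c0 (0 : Int)))
            ((List.range r0).flatMap (fun i => (List.range c0).filterMap (fun j =>
              if f i j ≠ 0 then some ((PySem.Int.mod (i : Int) R).toNat, j) else none)))) i j ≠ 0
        then some (i, (PySem.Int.mod (j : Int) C).toNat) else none))) := by
  apply scatter_eq
  · intro p hp
    simp only [List.mem_flatMap, List.mem_filterMap, List.mem_range,
      Option.ite_none_right_eq_some, Option.some.injEq] at hp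
    obtain ⟨i, hi, j, hj, _, hp⟩ := hp
    subst hp
    exact ⟨mod_toNat_lt i R hR, mod_toNat_lt j C hC⟩
  · intro p hp
    simp only [List.mem_flatMap, List.mem_filterMap, List.mem_range,
      Option.ite_none_right_eq_some, Option.some.injEq] at hp
    obtain ⟨i, hi, j, hj, _, hp⟩ := hp
    subst hp
    exact ⟨hi, mod_toNat_lt j C hC⟩
  · intro r c
    simp only [inter_cell f r0 c0 R hR, List.mem_flatMap, List.mem_filterMap, List.mem_range,
      Option.ite_none_right_eq_some, Option.some.injEq, Prod.mk.injEq, ne_eq, ite_eq_right_iff,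
      one_ne_zero, imp_false, not_not]
    constructor
    · rintro ⟨i, hi, j, hj, hf, h1, h2⟩
      exact ⟨(PySem.Int.mod (i : Int) R).toNat, mod_toNat_lt i R hR, j, hj,
        ⟨i, hi, hj, hf, rfl⟩, h1, h2⟩
    · rintro ⟨i, hiRn, j, hj, ⟨i', hi', hj', hf, h1⟩, h2, h3⟩
      exact ⟨i', hi', j, hj, hf, h1.trans h2, h3⟩

-- the cells A scans are all zero, under the all-zero disjunct of Pre_
theorem cells_zero (target : List (List Int))
    (hrect : ∀ row ∈ target, target.headI.length ≤ row.length)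
    (hz : ∀ row ∈ target, ∀ x ∈ row.take target.headI.length, x = 0)
    (i j : Nat) (hi : i < target.length) (hj : j < target.headI.length) :
    pvCell target i j = 0 := by
  have hmem : target.getD i [] ∈ target := by
    rw [List.getD_eq_getElem target [] hi]; exact List.getElem_mem hi
  have hlen : target.headI.length ≤ (target.getD i []).length := hrect _ hmem
  have hj' : j < (target.getD i []).length := by omega
  unfold pvCell
  rw [List.getD_eq_getElem _ 0 hj']
  have hjt : j < ((target.getD i []).take target.headI.length).length := by
    rw [List.length_take]; omega
  have heq : ((target.getD i []).take target.headI.length)[j] = (target.getD i [])[j] :=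
    List.getElem_take
  rw [← heq]
  exact hz _ hmem _ (List.getElem_mem hjt)

-- ===== VERDICT (by name: the statement is the Claim_ definition above) =====
theorem resize_target_torus_sum_spec : Claim_equal_resize_target_torus_sum := by
  intro target R C _ hpre
  obtain ⟨hne, hrect, hcase⟩ := hpre
  unfold Spec_resize_target_torus_sum resize_target_torus_sum resize_target_torus_sum_alt
  simp only [range_map_const]
  rcases hcase with ⟨hR, hC⟩ | hz
  · -- main case: 1 ≤ R and 1 ≤ C
    simp only [foldl_if_filterMap, foldl_apply_flatMap]
    exact torus_two_pass (fun i j => pvCell target i j) target.length target.headI.length R C hR hC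
  · -- all scanned cells are zero: both sides are the untouched zero grid
    have hcz : ∀ i ∈ List.range target.length, ∀ j ∈ List.range target.headI.length,
        pvCell target i j = 0 := fun i hi j hj =>
      cells_zero target hrect hz i j (List.mem_range.mp hi) (List.mem_range.mp hj)
    have hA := foldl_id (List.range target.length)
      (fun out i => (List.range target.headI.length).foldl (fun out j =>
        if pvCell target i j ≠ 0 then
          pvSetCell out (PySem.Int.mod (i : Int) R).toNat (PySem.Int.mod (j : Int) C).toNat
        else out) out)
      (List.replicate R.toNat (List.replicate C.toNat (0 : Int)))
      (fun i hi acc => foldl_id _ _ _ (fun j hj acc' => by simp [hcz i hi j hj]))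
    have hB1 := foldl_id (List.range target.length)
      (fun acc i => (List.range target.headI.length).foldl (fun acc j =>
        if pvCell target i j ≠ 0 then
          pvSetCell acc (PySem.Int.mod (i : Int) R).toNat j
        else acc) acc)
      (List.replicate R.toNat (List.replicate target.headI.length (0 : Int)))
      (fun i hi acc => foldl_id _ _ _ (fun j hj acc' => by simp [hcz i hi j hj]))
    have hB2 := foldl_id (List.range R.toNat)
      (fun out i => (List.range target.headI.length).foldl (fun out j =>
        if pvCell (List.replicate R.toNat (List.replicate target.headI.length (0 : Int))) i j ≠ 0 then
          pvSetCell out i (PySem.Int.mod (j : Int) C).toNat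
        else out) out)
      (List.replicate R.toNat (List.replicate C.toNat (0 : Int)))
      (fun i _ acc => foldl_id _ _ _ (fun j _ acc' => by
        simp [cell_zeros R.toNat target.headI.length i j]))
    rw [hA, hB1, hB2]
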